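-- pv_equiv track=rewrite | github.com/Septemberllly/TBFV4J_CSC | TBFV4J_Code/src/main/java/org/example/print/dynamic_testing .py | negate_ct_condition
-- ===== SOURCE A (Python) =====
-- def negate_ct_condition(ct):
--     """
--     Overall inversion of complex Ct conditions:
--     - Invert each sub-condition in Ct.
--     - Replace '&&' with '||'.
--     - If the subcondition already has '! ', then the double negative is eliminated.
--     """
--     # If Ct has outer parentheses, remove the outermost parentheses
--     if ct.startswith("(") and ct.endswith(")"):
--         ct = ct[1:-1]
--
--     # Use the split_logical function to split Ct into sub-conditions by '&&'
--     subconditions = split_logical(ct, "&&")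
--
--     # Go through each subcondition and invert it
--     negated_conditions = []
--     for condition in subconditions:
--         condition = condition.strip()
--         if condition.startswith("!(") and condition.endswith(")"):  # It's already the inverse condition
--             negated_conditions.append(condition[2:-1])  # Remove the double negative
--         elif condition.startswith("(") and condition.endswith(")"):  # Conditions that contain parentheses
--             negated_conditions.append(f"!{condition}")  # Direct inversion
--         else:
--             negated_conditions.append(f"!({condition})")  # Add parentheses and invert
--
--     # Concatenate the inverted condition with '||'
--     negated_ct = " || ".join(negated_conditions)
--
--     return negated_ct
--
-- def split_logical(expression, operator):
--     """
--     Split the logical expression with a given logical operator, such as '&&', while preserving the nested relationship of parentheses.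
--     """
--     parts = []
--     bracket_level = 0
--     current_part = []
--
--     i = 0
--     while i < len(expression):
--         char = expression[i]
--
--         # Update the bracket nesting level
--         if char == "(":
--             bracket_level += 1
--         elif char == ")":
--             bracket_level -= 1
--
--         # Split when the bracket level is 0 and an operator is encountered
--         if bracket_level == 0 and expression[i:i + len(operator)] == operator:
--             parts.append("".join(current_part).strip())
--             current_part = []
--             i += len(operator) - 1  # Skip operator
--         else:
--             current_part.append(char)
--
--         i += 1
--
--     # Add the last part
--     parts.append("".join(current_part).strip())
--     return parts
-- ===== SOURCE B (Python) =====
-- def negate_ct_condition(ct):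
--     """Split on every '&&' with str.split, then regroup fragments by paren-count
--     balance: a group is complete exactly when its '(' and ')' counts agree."""
--     if ct.startswith("(") and ct.endswith(")"):
--         ct = ct[1:-1]
--     groups = []
--     pending = None
--     for piece in ct.split("&&"):
--         pending = piece if pending is None else pending + "&&" + piece
--         if pending.count("(") == pending.count(")"):
--             groups.append(pending)
--             pending = None
--     if pending is not None:
--         groups.append(pending)
--     return " || ".join(_negate_part(g) for g in groups)
--
--
-- def _negate_part(part):
--     p = part.strip()
--     if p.endswith(")"):
--         if p.startswith("!("):
--             return p[2:-1]
--         if p.startswith("("):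
--             return "!" + p
--     return "!(" + p + ")"
-- ===== Notes on version B (the rewrite author's own statement) =====
-- stated objective: faster
-- what changed: B replaces A's per-character scan with a bracket-level counter by str.split on the operator followed by regrouping the fragments on parenthesis-count balance (merging fragments back while the open- and close-parenthesis counts of the pending group differ), then negating each complete group.
import Mathlib
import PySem

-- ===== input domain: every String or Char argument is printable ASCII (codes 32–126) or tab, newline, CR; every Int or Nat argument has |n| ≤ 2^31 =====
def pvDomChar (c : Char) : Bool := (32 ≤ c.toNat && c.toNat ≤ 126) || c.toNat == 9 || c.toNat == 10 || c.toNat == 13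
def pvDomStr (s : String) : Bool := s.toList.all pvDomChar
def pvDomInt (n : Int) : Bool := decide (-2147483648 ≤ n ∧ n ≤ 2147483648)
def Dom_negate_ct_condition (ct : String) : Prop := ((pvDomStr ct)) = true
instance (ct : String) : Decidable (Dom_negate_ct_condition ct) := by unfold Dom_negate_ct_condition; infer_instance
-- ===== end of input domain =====

-- B replaces A's character scan (bracket level + buffer) by str.split on the operator followed by
-- regrouping the fragments on parenthesis-count balance (measured faster in a timing run).

-- ===== PORT A =====
-- split_logical(expression, "&&"): index loop over the characters with a bracket level,
-- a current-part buffer and a parts accumulator; splits at top-level "&&".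
def splitLogicalA (expr : List Char) (level : Int) (cur : List Char) (parts : List (List Char)) : List (List Char) :=
  match expr with
  | [] => parts ++ [PySem.Chars.strip cur]
  | c :: rest =>
    let level' := if c = '(' then level + 1 else if c = ')' then level - 1 else level
    if level' = 0 ∧ (c :: rest).take 2 = ['&', '&'] then
      splitLogicalA (rest.drop 1) level' [] (parts ++ [PySem.Chars.strip cur])
    else
      splitLogicalA rest level' (cur ++ [c]) parts
termination_by expr.length
decreasing_by all_goals simp

-- the body of A's for-loop: strip the part again, then the three-way negation rule
def negOneA (condition : List Char) : List Char :=
  let c := PySem.Chars.strip condition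
  if PySem.Chars.startswith c ['!', '('] && PySem.Chars.endswith c [')'] then
    PySem.List.slice c (some 2) (some (-1))
  else if PySem.Chars.startswith c ['('] && PySem.Chars.endswith c [')'] then
    '!' :: c
  else
    '!' :: '(' :: (c ++ [')'])

def negate_ct_condition (ct : String) : String :=
  let cs := ct.toList
  let cs := if PySem.Chars.startswith cs ['('] && PySem.Chars.endswith cs [')'] then
    PySem.List.slice cs (some 1) (some (-1)) else cs
  let subconditions := splitLogicalA cs 0 [] []
  let negated := subconditions.foldl (fun acc condition => acc ++ [negOneA condition]) []
  String.ofList (PySem.Chars.join " || ".toList negated)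

-- ===== PORT B =====
-- _negate_part: strip, branch on the trailing ')' first
def negPartB (part : List Char) : List Char :=
  let p := PySem.Chars.strip part
  if PySem.Chars.endswith p [')'] then
    if PySem.Chars.startswith p ['!', '('] then
      PySem.List.slice p (some 2) (some (-1))
    else if PySem.Chars.startswith p ['('] then
      '!' :: p
    else
      '!' :: '(' :: (p ++ [')'])
  else
    '!' :: '(' :: (p ++ [')'])

-- Source B's for-loop over ct.split("&&") with its Optional pending group:
-- glue the next fragment onto pending (with the consumed "&&"), emit when '(' and ')' counts agree
def mergeB (pieces : List (List Char)) (pending : Option (List Char)) : List (List Char) :=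
  match pieces with
  | [] => match pending with | none => [] | some q => [q]
  | f :: rest =>
    let p := match pending with | none => f | some q => q ++ ['&', '&'] ++ f
    if PySem.Chars.count p ['('] = PySem.Chars.count p [')'] then
      p :: mergeB rest none
    else
      mergeB rest (some p)

def negate_ct_condition_alt (ct : String) : String :=
  let cs := ct.toList
  let cs := if PySem.Chars.startswith cs ['('] && PySem.Chars.endswith cs [')'] then
    PySem.List.slice cs (some 1) (some (-1)) else cs
  let groups := mergeB (PySem.Chars.splitOn cs ['&', '&']) none
  String.ofList (PySem.Chars.join " || ".toList (groups.map negPartB))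

-- ===== PRECONDITION & SPEC =====
def Spec_negate_ct_condition (ct : String) (out : String) : Prop := out = negate_ct_condition_alt ct
instance (ct : String) (out : String) : Decidable (Spec_negate_ct_condition ct out) := by unfold Spec_negate_ct_condition; infer_instance

-- ===== CLAIM (what is proved, stated in full; the proofs are below) =====
def Claim_equal_negate_ct_condition : Prop := ∀ (ct : String), Dom_negate_ct_condition ct → Spec_negate_ct_condition ct (negate_ct_condition ct)

-- ===== LEMMAS AND PROOFS =====

-- strip is idempotent -------------------------------------------------------
theorem dropWhile_dropWhile_self {α : Type} (p : α → Bool) (l : List α) :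
    (l.dropWhile p).dropWhile p = l.dropWhile p := by
  induction l with
  | nil => simp
  | cons a t ih =>
    by_cases h : p a
    · simp [h, ih]
    · simp [h]

theorem dropWhile_eq_self_of_prefix {α : Type} (p : α → Bool) {l₁ l₂ : List α}
    (hp : l₁ <+: l₂) (h : l₂.dropWhile p = l₂) : l₁.dropWhile p = l₁ := by
  cases l₁ with
  | nil => simp
  | cons a t =>
    obtain ⟨r, hr⟩ := hp
    subst hr
    by_cases hpa : p a
    · exfalso
      have h1 : List.dropWhile p (a :: t ++ r) = List.dropWhile p (t ++ r) := by
        simp [hpa]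
      have h2 := List.length_dropWhile_le p (t ++ r)
      have h3 := congrArg List.length h
      rw [h1] at h3
      simp [List.length_append] at h2 h3
      omega
    · simp [hpa]

theorem lstrip_lstrip (l : List Char) :
    PySem.Chars.lstrip (PySem.Chars.lstrip l) = PySem.Chars.lstrip l := by
  unfold PySem.Chars.lstrip
  exact dropWhile_dropWhile_self _ _

theorem rstrip_rstrip (l : List Char) :
    PySem.Chars.rstrip (PySem.Chars.rstrip l) = PySem.Chars.rstrip l := by
  unfold PySem.Chars.rstrip
  rw [List.reverse_reverse, dropWhile_dropWhile_self]

theorem rstrip_prefix (l : List Char) : PySem.Chars.rstrip l <+: l := by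
  have h := List.dropWhile_suffix (l := l.reverse) (p := PySem.Chars.isspace)
  have h2 := h.reverse
  simpa [PySem.Chars.rstrip] using h2

theorem lstrip_rstrip_lstrip (l : List Char) :
    PySem.Chars.lstrip (PySem.Chars.rstrip (PySem.Chars.lstrip l)) = PySem.Chars.rstrip (PySem.Chars.lstrip l) := by
  show List.dropWhile PySem.Chars.isspace _ = _
  exact dropWhile_eq_self_of_prefix _ (rstrip_prefix (PySem.Chars.lstrip l)) (lstrip_lstrip l)

theorem strip_strip (l : List Char) :
    PySem.Chars.strip (PySem.Chars.strip l) = PySem.Chars.strip l := by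
  unfold PySem.Chars.strip
  rw [lstrip_rstrip_lstrip, rstrip_rstrip]

theorem negOneA_strip (l : List Char) : negOneA (PySem.Chars.strip l) = negOneA l := by
  simp only [negOneA, strip_strip]

theorem negPartB_eq_negOneA (l : List Char) : negPartB l = negOneA l := by
  simp only [negPartB, negOneA]
  by_cases he : PySem.Chars.endswith (PySem.Chars.strip l) [')'] = true <;>
    by_cases h1 : PySem.Chars.startswith (PySem.Chars.strip l) ['!', '('] = true <;>
      by_cases h2 : PySem.Chars.startswith (PySem.Chars.strip l) ['('] = true <;>
        simp [he, h1, h2]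

-- A's split without the strip-at-emission and without the accumulator -------
def rawA (expr : List Char) (level : Int) (cur : List Char) : List (List Char) :=
  match expr with
  | [] => [cur]
  | c :: rest =>
    let level' := if c = '(' then level + 1 else if c = ')' then level - 1 else level
    if level' = 0 ∧ (c :: rest).take 2 = ['&', '&'] then
      cur :: rawA (rest.drop 1) level' []
    else
      rawA rest level' (cur ++ [c])
termination_by expr.length
decreasing_by all_goals simp

theorem splitLogicalA_eq_rawA (expr : List Char) (level : Int) (cur : List Char)
    (parts : List (List Char)) :
    splitLogicalA expr level cur parts = parts ++ (rawA expr level cur).map PySem.Chars.strip := by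
  match expr with
  | [] => simp [splitLogicalA, rawA]
  | c :: rest =>
    simp only [splitLogicalA, rawA]
    generalize (if c = '(' then level + 1 else if c = ')' then level - 1 else level) = lvl
    split_ifs with h
    · rw [splitLogicalA_eq_rawA (rest.drop 1) lvl [] (parts ++ [PySem.Chars.strip cur])]
      simp
    · exact splitLogicalA_eq_rawA rest lvl (cur ++ [c]) parts
termination_by expr.length
decreasing_by all_goals simp

-- signed parenthesis balance ------------------------------------------------
def balC (p : List Char) : Int := (p.count '(' : Int) - (p.count ')' : Int)

theorem count_one (a c : Char) : List.count a [c] = if a = c then 1 else 0 := by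
  by_cases h : a = c
  · subst h; simp
  · rw [if_neg h, List.count_eq_zero]
    simp [h]

theorem balC_append_char (p : List Char) (c : Char) :
    balC (p ++ [c]) = if c = '(' then balC p + 1 else if c = ')' then balC p - 1 else balC p := by
  simp only [balC, List.count_append, count_one]
  by_cases h1 : c = '('
  · subst h1
    rw [if_pos rfl, if_neg (by decide : ¬ (')' : Char) = '('), if_pos rfl]
    push_cast
    ring
  · by_cases h2 : c = ')'
    · subst h2
      rw [if_neg (by decide : ¬ ('(' : Char) = ')'), if_pos rfl, if_neg (by decide : ¬ (')' : Char) = '('), if_pos rfl]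
      push_cast
      ring
    · rw [if_neg (fun hh => h1 hh.symm), if_neg (fun hh => h2 hh.symm), if_neg h1, if_neg h2]
      push_cast
      ring

theorem balC_amp (p : List Char) : balC (p ++ ['&']) = balC p := by
  rw [balC_append_char, if_neg (by decide), if_neg (by decide)]

theorem lvlAmp (x : Int) :
    (if ('&' : Char) = '(' then x + 1 else if ('&' : Char) = ')' then x - 1 else x) = x := by
  rw [if_neg (by decide), if_neg (by decide)]

-- Chars.count with a single-character needle is List.count --------------------
theorem count_go_single (c : Char) (fuel : Nat) (s : List Char) (acc : Nat)
    (h : s.length ≤ fuel) :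
    PySem.Chars.count.go [c] fuel s acc = acc + s.count c := by
  match fuel, s with
  | 0, [] => simp [PySem.Chars.count.go]
  | 0, a :: t => simp at h
  | Nat.succ f, [] => simp [PySem.Chars.count.go]
  | Nat.succ f, a :: t =>
    simp only [PySem.Chars.count.go]
    simp only [List.length_cons] at h
    by_cases hc : c = a
    · subst hc
      have hpre : List.isPrefixOf [c] (c :: t) = true := by simp [List.isPrefixOf]
      rw [if_pos hpre]
      simp only [List.length_cons, List.length_nil, Nat.zero_add, List.drop_succ_cons, List.drop_zero]
      rw [count_go_single c f t (acc + 1) (by omega)]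
      simp
      omega
    · have hpre : List.isPrefixOf [c] (a :: t) = false := by
        simp [List.isPrefixOf]
        intro hh
        exact hc hh
      rw [hpre]
      simp only [Bool.false_eq_true, if_false]
      rw [count_go_single c f t acc (by omega)]
      simp only [List.count_cons]
      simp
      exact fun hh => hc hh.symm
termination_by fuel

theorem count_single (s : List Char) (c : Char) :
    PySem.Chars.count s [c] = s.count c := by
  unfold PySem.Chars.count
  rw [if_neg (by simp)]
  rw [count_go_single c s.length s 0 le_rfl]
  simp

-- Python's split("&&") as a structural recursion -----------------------------
def splitAmp (l : List Char) : List Char × List (List Char) :=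
  match l with
  | [] => ([], [])
  | c :: rest =>
    if c = '&' ∧ rest.take 1 = ['&'] then
      ([], (splitAmp (rest.drop 1)).1 :: (splitAmp (rest.drop 1)).2)
    else
      ((c :: (splitAmp rest).1), (splitAmp rest).2)
termination_by l.length
decreasing_by all_goals simp

theorem splitAmp_amp (t : List Char) :
    splitAmp ('&' :: '&' :: t) = ([], (splitAmp t).1 :: (splitAmp t).2) := by
  rw [splitAmp, if_pos ⟨rfl, by simp⟩]
  simp

theorem splitAmp_other (c : Char) (rest : List Char) (hs : ¬ (c = '&' ∧ rest.take 1 = ['&'])) :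
    splitAmp (c :: rest) = ((c :: (splitAmp rest).1), (splitAmp rest).2) := by
  rw [splitAmp, if_neg hs]

theorem splitOn_go_amp (fuel : Nat) (l cur : List Char) (acc : List (List Char))
    (h : l.length < fuel) :
    PySem.Chars.splitOn.go ['&', '&'] fuel l cur acc =
      acc.reverse ++ (cur.reverse ++ (splitAmp l).1) :: (splitAmp l).2 := by
  match fuel, l with
  | 0, _ => omega
  | Nat.succ f, [] => simp [PySem.Chars.splitOn.go, splitAmp]
  | Nat.succ f, c :: rest =>
    simp only [PySem.Chars.splitOn.go]
    by_cases hp : c = '&' ∧ rest.take 1 = ['&']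
    · obtain ⟨hc, ht⟩ := hp
      subst hc
      cases rest with
      | nil => simp at ht
      | cons d t =>
        have hd : d = '&' := by simpa using ht
        subst hd
        have hpre : List.isPrefixOf ['&', '&'] ('&' :: '&' :: t) = true := by
          simp [List.isPrefixOf]
        rw [if_pos hpre]
        simp only [List.length_cons] at h
        rw [splitOn_go_amp f (List.drop ['&', '&'].length ('&' :: '&' :: t)) [] (cur.reverse :: acc)
          (by simp; omega)]
        simp [splitAmp_amp]
    · have hpre : List.isPrefixOf ['&', '&'] (c :: rest) = false := by
        cases rest with
        | nil => simp [List.isPrefixOf]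
        | cons d t =>
          by_cases hc : c = '&'
          · subst hc
            have hd : ¬ d = '&' := fun hd => hp ⟨rfl, by simp [hd]⟩
            simp [List.isPrefixOf]
            intro hh
            exact hd hh.symm
          · simp [List.isPrefixOf]
            intro hh
            exact absurd hh.symm hc
      rw [hpre]
      simp only [Bool.false_eq_true, if_false]
      simp only [List.length_cons] at h
      rw [splitOn_go_amp f rest (c :: cur) acc (by omega)]
      rw [splitAmp_other c rest hp]
      simp
termination_by fuel

theorem splitOn_eq_splitAmp (l : List Char) :
    PySem.Chars.splitOn l ['&', '&'] = (splitAmp l).1 :: (splitAmp l).2 := by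
  unfold PySem.Chars.splitOn
  rw [splitOn_go_amp (l.length + 1) l [] [] (by omega)]
  simp

-- mergeB in "current group explicit" form -----------------------------------
def mergeGo (p : List Char) (fs : List (List Char)) : List (List Char) :=
  if balC p = 0 then
    p :: (match fs with | [] => [] | f :: fs' => mergeGo f fs')
  else
    match fs with | [] => [p] | f :: fs' => mergeGo (p ++ ['&', '&'] ++ f) fs'
termination_by fs.length
decreasing_by all_goals simp_all

theorem count_eq_iff_balC (p : List Char) :
    (PySem.Chars.count p ['('] = PySem.Chars.count p [')']) ↔ balC p = 0 := by
  rw [count_single, count_single]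
  unfold balC
  omega

def glue (pending : Option (List Char)) (f : List Char) : List Char :=
  match pending with
  | none => f
  | some q => q ++ ['&', '&'] ++ f

theorem mergeB_nil (pending : Option (List Char)) :
    mergeB [] pending = match pending with | none => [] | some q => [q] := rfl

theorem mergeB_cons (f : List Char) (rest : List (List Char)) (pending : Option (List Char)) :
    mergeB (f :: rest) pending =
      (if PySem.Chars.count (glue pending f) ['('] = PySem.Chars.count (glue pending f) [')'] then
        glue pending f :: mergeB rest none
      else
        mergeB rest (some (glue pending f))) := by
  cases pending <;> rfl

theorem mergeB_eq_mergeGo (fs : List (List Char)) (pending : Option (List Char)) (f : List Char) :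
    mergeB (f :: fs) pending = mergeGo (glue pending f) fs := by
  induction fs generalizing pending f with
  | nil =>
    rw [mergeB_cons, mergeGo]
    split_ifs with h1 h2 h2
    · simp [mergeB_nil]
    · exact absurd ((count_eq_iff_balC _).mp h1) h2
    · exact absurd ((count_eq_iff_balC _).mpr h2) h1
    · simp [mergeB_nil]
  | cons g gs ih =>
    rw [mergeB_cons, mergeGo]
    split_ifs with h1 h2 h2
    · rw [ih none g]; rfl
    · exact absurd ((count_eq_iff_balC _).mp h1) h2
    · exact absurd ((count_eq_iff_balC _).mpr h2) h1
    · rw [ih (some (glue pending f)) g]; rfl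

-- the heart: A's character scan equals split-then-regroup ---------------------
theorem rawA_eq_mergeGo (expr p : List Char) :
    rawA expr (balC p) p = mergeGo (p ++ (splitAmp expr).1) (splitAmp expr).2 := by
  match expr with
  | [] =>
    simp only [splitAmp, List.append_nil]
    rw [rawA, mergeGo]
    split_ifs <;> rfl
  | c :: rest =>
    by_cases hs : c = '&' ∧ rest.take 1 = ['&']
    · obtain ⟨hc, ht⟩ := hs
      subst hc
      cases rest with
      | nil => simp at ht
      | cons d t =>
        have hd : d = '&' := by simpa using ht
        subst hd
        rw [splitAmp_amp]
        simp only [List.append_nil]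
        rw [mergeGo]
        have ht0 := rawA_eq_mergeGo t []
        have ht1 := rawA_eq_mergeGo t (p ++ ['&'] ++ ['&'])
        rw [show balC ([] : List Char) = 0 from by simp [balC]] at ht0
        rw [show balC (p ++ ['&'] ++ ['&']) = balC p from by rw [balC_amp, balC_amp]] at ht1
        by_cases hb : balC p = 0
        · rw [if_pos hb]
          simp only [rawA, lvlAmp]
          rw [if_pos ⟨hb, by simp⟩]
          simp only [List.drop_succ_cons, List.drop_zero]
          rw [hb, ht0]
          simp
        · rw [if_neg hb]
          simp only [rawA, lvlAmp, List.take_succ_cons, List.drop_succ_cons, List.drop_zero]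
          rw [if_neg (fun hh => hb hh.1), if_neg (fun hh => hb hh.1)]
          rw [ht1]
          simp [List.append_assoc]
    · rw [splitAmp_other c rest hs]
      have hupd : (if c = '(' then balC p + 1 else if c = ')' then balC p - 1 else balC p) = balC (p ++ [c]) := by
        rw [balC_append_char]
      have hcond : ¬ ((if c = '(' then balC p + 1 else if c = ')' then balC p - 1 else balC p) = 0 ∧ (c :: rest).take 2 = ['&', '&']) := by
        rintro ⟨-, htake⟩
        rw [List.take_succ_cons] at htake
        simp only [List.cons.injEq] at htake
        refine hs ⟨htake.1, ?_⟩
        cases rest with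
        | nil => simp at htake
        | cons d t => simpa using htake.2
      simp only [rawA]
      rw [if_neg hcond, hupd]
      rw [rawA_eq_mergeGo rest (p ++ [c])]
      simp [List.append_assoc]
termination_by expr.length
decreasing_by all_goals simp

-- ===== VERDICT (by name: the statement is the Claim_ definition above) =====
theorem negate_ct_condition_spec : Claim_equal_negate_ct_condition := by
  intro ct _
  unfold Spec_negate_ct_condition negate_ct_condition negate_ct_condition_alt
  simp only [PySem.List.foldl_append_singleton_eq_map, List.nil_append]
  generalize (if PySem.Chars.startswith ct.toList ['('] && PySem.Chars.endswith ct.toList [')'] then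
    PySem.List.slice ct.toList (some 1) (some (-1)) else ct.toList) = cs
  rw [splitLogicalA_eq_rawA, splitOn_eq_splitAmp, mergeB_eq_mergeGo]
  have h0 := rawA_eq_mergeGo cs []
  rw [show balC ([] : List Char) = 0 from by simp [balC]] at h0
  rw [show glue none (splitAmp cs).1 = [] ++ (splitAmp cs).1 from by simp [glue]]
  rw [← h0]
  simp only [List.nil_append, List.map_map]
  have hmap : List.map (negOneA ∘ PySem.Chars.strip) (rawA cs 0 []) = List.map negPartB (rawA cs 0 []) := by
    apply List.map_congr_left
    intro x _
    simp only [Function.comp_apply, negPartB_eq_negOneA, negOneA_strip]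
  rw [hmap]
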